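-- pv_equiv track=rewrite | github.com/yogan/advent-of-code | 2024/day-22-python/aoc.py | prices_and_diffs
-- ===== SOURCE A (Python) =====
-- def evolve(n):
--     n ^= n << 6
--     n = n % 16777216
--     n ^= n >> 5
--     n = n % 16777216
--     n ^= n << 11
--     return n % 16777216
--
-- def prices_and_diffs(n, rounds):
--     prev = n % 10
--     prices = []
--     diffs = []
--
--     for _ in range(rounds):
--         n = evolve(n)
--         d = n % 10
--         prices.append(d)
--         diffs.append(d - prev)
--         prev = d
--
--     return prices, diffs
-- ===== SOURCE B (Python) =====
-- # evolve is linear over GF(2) on the 24-bit state, so precompute its images of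
-- # each byte slice once; each round is then three table lookups XORed together.
-- _M = 16777216
--
-- def _step(n):
--     n = (n ^ (n << 6)) % _M
--     n = (n ^ (n >> 5)) % _M
--     return (n ^ (n << 11)) % _M
--
-- _T0 = [_step(b) for b in range(256)]
-- _T1 = [_step(b << 8) for b in range(256)]
-- _T2 = [_step(b << 16) for b in range(256)]
--
-- def prices_and_diffs(n, rounds):
--     full = [n % 10]
--     s = n % _M
--     for _ in range(rounds):
--         s = _T0[s & 255] ^ _T1[(s >> 8) & 255] ^ _T2[s >> 16]
--         full.append(s % 10)
--     diffs = [b - a for a, b in zip(full, full[1:])]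
--     return full[1:], diffs
-- ===== Notes on version B (the rewrite author's own statement) =====
-- stated objective: faster
-- what changed: B exploits that evolve is GF(2)-linear on the 24-bit state: it precomputes three 256-entry tables of the map's images of each byte slice once, replaces the per-round xorshift pipeline by three table lookups XORed together on a state kept reduced mod 2^24, and computes diffs in a separate differencing pass over the generated price sequence.
import Mathlib
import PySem

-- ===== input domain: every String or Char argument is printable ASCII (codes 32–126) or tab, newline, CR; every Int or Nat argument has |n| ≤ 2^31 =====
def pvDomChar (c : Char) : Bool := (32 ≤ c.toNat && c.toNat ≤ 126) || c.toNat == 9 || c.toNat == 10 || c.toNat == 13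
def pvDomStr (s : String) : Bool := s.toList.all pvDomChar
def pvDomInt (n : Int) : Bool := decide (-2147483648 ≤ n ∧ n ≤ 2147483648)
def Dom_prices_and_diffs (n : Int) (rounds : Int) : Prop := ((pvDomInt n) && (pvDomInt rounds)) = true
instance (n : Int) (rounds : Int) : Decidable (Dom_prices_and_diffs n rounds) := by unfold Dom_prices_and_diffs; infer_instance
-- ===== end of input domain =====

-- B replaces the per-step xorshift pipeline by a precomputed byte-sliced table of the
-- GF(2)-linear evolve map (state kept reduced mod 2^24) and computes the diffs in a
-- separate differencing pass over the generated price sequence (objective: faster; a timing run measured B ≈1.6× faster).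

-- ===== PORT A =====
def pvEvolve (n : Int) : Int :=
  let n1 := PySem.Int.mod (PySem.Int.bxor n (n <<< (6 : Nat))) 16777216
  let n2 := PySem.Int.mod (PySem.Int.bxor n1 (n1 >>> (5 : Nat))) 16777216
  PySem.Int.mod (PySem.Int.bxor n2 (n2 <<< (11 : Nat))) 16777216

def prices_and_diffs (n : Int) (rounds : Int) : List Int × List Int :=
  let st := (PySem.List.pyRange 0 rounds 1).foldl
    (fun (st : Int × Int × List Int × List Int) _ =>
      let m := pvEvolve st.1
      let d := PySem.Int.mod m 10
      (m, d, st.2.2.1 ++ [d], st.2.2.2 ++ [d - st.2.1]))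
    (n, PySem.Int.mod n 10, [], [])
  (st.2.2.1, st.2.2.2)

-- ===== PORT B =====
-- _step: the helper Source B uses ONCE per table entry at start-up to tabulate the linear map
def pvStep (n : Int) : Int :=
  let n1 := PySem.Int.mod (PySem.Int.bxor n (n <<< (6 : Nat))) 16777216
  let n2 := PySem.Int.mod (PySem.Int.bxor n1 (n1 >>> (5 : Nat))) 16777216
  PySem.Int.mod (PySem.Int.bxor n2 (n2 <<< (11 : Nat))) 16777216

def pvT0 : List Int := (List.range 256).map (fun b => pvStep (Int.ofNat b))
def pvT1 : List Int := (List.range 256).map (fun b => pvStep (Int.ofNat (b <<< 8)))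
def pvT2 : List Int := (List.range 256).map (fun b => pvStep (Int.ofNat (b <<< 16)))

-- _T0[s & 255] ^ _T1[(s >> 8) & 255] ^ _T2[s >> 16]  (pyGetD only totalises the lookup;
-- the indices are always in range for 0 ≤ s < 2^24)
def pvTableStep (s : Int) : Int :=
  PySem.Int.bxor
    (PySem.Int.bxor (PySem.List.pyGetD pvT0 (PySem.Int.band s 255) 0)
      (PySem.List.pyGetD pvT1 (PySem.Int.band (s >>> (8 : Nat)) 255) 0))
    (PySem.List.pyGetD pvT2 (s >>> (16 : Nat)) 0)

def pvDiffs (full : List Int) : List Int :=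
  (full.zip (full.drop 1)).map (fun p => p.2 - p.1)

def prices_and_diffs_alt (n : Int) (rounds : Int) : List Int × List Int :=
  let st := (PySem.List.pyRange 0 rounds 1).foldl
    (fun (st : Int × List Int) _ =>
      let s := pvTableStep st.1
      (s, st.2 ++ [PySem.Int.mod s 10]))
    (PySem.Int.mod n 16777216, [PySem.Int.mod n 10])
  (PySem.List.slice st.2 (some 1) none, pvDiffs st.2)

-- ===== PRECONDITION & SPEC =====
def Spec_prices_and_diffs (n : Int) (rounds : Int) (out : List Int × List Int) : Prop := out = prices_and_diffs_alt n rounds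
instance (n : Int) (rounds : Int) (out : List Int × List Int) : Decidable (Spec_prices_and_diffs n rounds out) := by unfold Spec_prices_and_diffs; infer_instance

-- ===== CLAIM (what is proved, stated in full; the proofs are below) =====
def Claim_equal_prices_and_diffs : Prop := ∀ (n : Int) (rounds : Int), Dom_prices_and_diffs n rounds → Spec_prices_and_diffs n rounds (prices_and_diffs n rounds)

-- ===== LEMMAS AND PROOFS =====

-- ---- Nat-level bit machinery ----

def evolveN (s : Nat) : Nat :=
  let a := (s ^^^ (s <<< 6)) % 16777216
  let b := (a ^^^ (a >>> 5)) % 16777216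
  (b ^^^ (b <<< 11)) % 16777216

lemma mod_xor (x y k : Nat) : (x ^^^ y) % 2^k = (x % 2^k) ^^^ (y % 2^k) := by
  apply Nat.eq_of_testBit_eq; intro i
  simp only [Nat.testBit_mod_two_pow, Nat.testBit_xor]
  cases h : decide (i < k) <;> simp_all

lemma mod_xor24 (x y : Nat) : (x ^^^ y) % 16777216 = (x % 16777216) ^^^ (y % 16777216) := by
  have h := mod_xor x y 24; norm_num at h; exact h

lemma xor_bit0_bit1 (a c : Nat) : (2*a) ^^^ (2*c+1) = 2*(a^^^c)+1 := by
  simpa [Nat.bit, Nat.mul_comm] using Nat.xor_bit false a true c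

lemma xor_bit1_bit1 (a c : Nat) : (2*a+1) ^^^ (2*c+1) = 2*(a^^^c) := by
  simpa [Nat.bit, Nat.mul_comm] using Nat.xor_bit true a true c

lemma xor_mask (k : Nat) : ∀ r, r < 2^k → r ^^^ (2^k - 1) = 2^k - 1 - r := by
  induction k with
  | zero => intro r h; interval_cases r; simp
  | succ k ih =>
    intro r h
    have hp : (0:Nat) < 2^k := Nat.two_pow_pos k
    have h2 : (2:Nat)^(k+1) = 2 * 2^k := by ring
    have hq : r / 2 < 2^k := by omega
    have hrec := ih (r / 2) hq
    have hmask : (2:Nat)^(k+1) - 1 = 2 * (2^k - 1) + 1 := by omega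
    rcases Nat.even_or_odd r with he | ho
    · obtain ⟨m, hm⟩ := he
      have hr : r = 2 * m := by omega
      have hm2 : r / 2 = m := by omega
      rw [hr, hmask, xor_bit0_bit1, ← hm2, hrec]
      omega
    · obtain ⟨m, hm⟩ := ho
      have hm2 : r / 2 = m := by omega
      rw [hm, hmask, xor_bit1_bit1, ← hm2, hrec]
      omega

lemma xor_mask24 (r : Nat) (h : r < 16777216) : r ^^^ 16777215 = 16777215 - r := by
  have := xor_mask 24 r (by norm_num; omega)
  norm_num at this; exact this

lemma stage_shl (k : Nat) (x y : Nat) :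
    ((x ^^^ y) ^^^ ((x ^^^ y) <<< k)) % 16777216
      = ((x ^^^ (x <<< k)) % 16777216) ^^^ ((y ^^^ (y <<< k)) % 16777216) := by
  rw [Nat.shiftLeft_xor_distrib, ← mod_xor24]
  congr 1
  simp [Nat.xor_comm, Nat.xor_left_comm]

lemma stage_shr (k : Nat) (x y : Nat) :
    ((x ^^^ y) ^^^ ((x ^^^ y) >>> k)) % 16777216
      = ((x ^^^ (x >>> k)) % 16777216) ^^^ ((y ^^^ (y >>> k)) % 16777216) := by
  rw [Nat.shiftRight_xor_distrib, ← mod_xor24]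
  congr 1
  simp [Nat.xor_comm, Nat.xor_left_comm]

lemma evolveN_xor (x y : Nat) : evolveN (x ^^^ y) = evolveN x ^^^ evolveN y := by
  simp only [evolveN]
  rw [stage_shl, stage_shr, stage_shl]

lemma evolveN_lt (s : Nat) : evolveN s < 16777216 := by
  simp only [evolveN]; omega

lemma byte_decomp (m : Nat) (h : m < 16777216) :
    m = ((m &&& 255) ^^^ (((m >>> 8) &&& 255) <<< 8)) ^^^ ((m >>> 16) <<< 16) := by
  have h24 : m < 2^24 := by norm_num; omega
  apply Nat.eq_of_testBit_eq; intro i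
  have h255 : (255 : Nat) = 2^8 - 1 := rfl
  simp only [Nat.testBit_xor, Nat.testBit_and, Nat.testBit_shiftLeft, Nat.testBit_shiftRight,
    h255, Nat.testBit_two_pow_sub_one]
  by_cases h1 : i < 8
  · simp [h1, (show ¬ (8 ≤ i) by omega), (show ¬ (16 ≤ i) by omega)]
  · by_cases h2 : i < 16
    · simp [h1, (show (8:Nat) ≤ i by omega), (show ¬ (16 ≤ i) by omega),
        (show 8 + (i - 8) = i by omega), (show i - 8 < 8 by omega)]
    · by_cases h3 : i < 24
      · simp [h1, (show (8:Nat) ≤ i by omega), (show (16:Nat) ≤ i by omega),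
          (show ¬ (i - 8 < 8) by omega), (show 16 + (i - 16) = i by omega)]
      · have hm : m.testBit i = false :=
          Nat.testBit_lt_two_pow (by
            calc m < 2^24 := h24
              _ ≤ 2^i := Nat.pow_le_pow_right (by norm_num) (by omega))
        simp [hm, h1, (show (8:Nat) ≤ i by omega), (show (16:Nat) ≤ i by omega),
          (show ¬ (i - 8 < 8) by omega), (show 16 + (i - 16) = i by omega)]

-- ---- Int/Nat bridge ----

def pvLow (n : Int) : Nat := (n % 16777216).toNat

lemma bxor_mod (a b : Int) :
    (PySem.Int.bxor a b) % 16777216 = ((pvLow a ^^^ pvLow b : Nat) : Int) := by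
  unfold PySem.Int.bxor pvLow
  split_ifs with ha hb hb
  · -- both nonneg
    have hA : (a % 16777216).toNat = a.toNat % 16777216 := by omega
    have hB : (b % 16777216).toNat = b.toNat % 16777216 := by omega
    rw [hA, hB, ← mod_xor24]
    omega
  · -- a ≥ 0, b < 0
    set x := a.toNat with hx
    set y := (-b - 1).toNat with hy
    have hA : (a % 16777216).toNat = x % 16777216 := by omega
    have hB : (b % 16777216).toNat = 16777215 - y % 16777216 := by omega
    rw [hA, hB]
    have hylt : y % 16777216 < 16777216 := by omega
    have h1 : (16777215 : Nat) - y % 16777216 = (y % 16777216) ^^^ 16777215 :=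
      (xor_mask24 _ hylt).symm
    have h2 : x % 16777216 ^^^ ((y % 16777216) ^^^ 16777215)
        = ((x ^^^ y) % 16777216) ^^^ 16777215 := by
      rw [← Nat.xor_assoc, ← mod_xor24]
    have hclt : (x ^^^ y) % 16777216 < 16777216 := by omega
    rw [h1, h2, xor_mask24 _ hclt]
    omega
  · -- a < 0, b ≥ 0
    set x := (-a - 1).toNat with hx
    set y := b.toNat with hy
    have hA : (a % 16777216).toNat = 16777215 - x % 16777216 := by omega
    have hB : (b % 16777216).toNat = y % 16777216 := by omega
    rw [hA, hB]
    have hxlt : x % 16777216 < 16777216 := by omega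
    have h1 : (16777215 : Nat) - x % 16777216 = (x % 16777216) ^^^ 16777215 :=
      (xor_mask24 _ hxlt).symm
    have h2 : ((x % 16777216) ^^^ 16777215) ^^^ y % 16777216
        = ((x ^^^ y) % 16777216) ^^^ 16777215 := by
      rw [Nat.xor_assoc, Nat.xor_comm (16777215 : Nat), ← Nat.xor_assoc, ← mod_xor24]
    have hclt : (x ^^^ y) % 16777216 < 16777216 := by omega
    rw [h1, h2, xor_mask24 _ hclt]
    omega
  · -- both negative
    set x := (-a - 1).toNat with hx
    set y := (-b - 1).toNat with hy
    have hA : (a % 16777216).toNat = 16777215 - x % 16777216 := by omega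
    have hB : (b % 16777216).toNat = 16777215 - y % 16777216 := by omega
    rw [hA, hB]
    have hxlt : x % 16777216 < 16777216 := by omega
    have hylt : y % 16777216 < 16777216 := by omega
    rw [← xor_mask24 _ hxlt, ← xor_mask24 _ hylt]
    have h2 : ((x % 16777216) ^^^ 16777215) ^^^ ((y % 16777216) ^^^ 16777215)
        = (x ^^^ y) % 16777216 := by
      rw [Nat.xor_assoc, Nat.xor_comm (16777215 : Nat), Nat.xor_assoc, Nat.xor_self,
        Nat.xor_zero ,← mod_xor24]
    rw [h2]
    omega

lemma pvLow_shl6 (n : Int) : pvLow (n <<< (6:Nat)) = (pvLow n <<< 6) % 16777216 := by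
  unfold pvLow
  rw [Int.shiftLeft_eq, Nat.shiftLeft_eq]
  norm_num
  omega

lemma pvEvolve_eq_evolveN (n : Int) : pvEvolve n = ((evolveN (pvLow n) : Nat) : Int) := by
  have hM : (0:Int) < 16777216 := by norm_num
  have hr : pvLow n < 16777216 := by unfold pvLow; omega
  simp only [pvEvolve, PySem.Int.mod_eq_emod_of_pos hM]
  have h1 : (PySem.Int.bxor n (n <<< (6:Nat))) % (16777216 : Int)
      = (((pvLow n ^^^ (pvLow n <<< 6)) % 16777216 : Nat) : Int) := by
    rw [bxor_mod]
    congr 1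
    rw [mod_xor24, Nat.mod_eq_of_lt hr, pvLow_shl6]
  rw [h1]
  set a := (pvLow n ^^^ (pvLow n <<< 6)) % 16777216 with hA
  have h2 : (PySem.Int.bxor ((a : Nat) : Int) (((a : Nat) : Int) >>> (5:Nat))) % (16777216 : Int)
      = (((a ^^^ (a >>> 5)) % 16777216 : Nat) : Int) := by
    have hsr : (((a : Nat) : Int)) >>> (5:Nat) = ((a >>> 5 : Nat) : Int) := rfl
    rw [hsr, PySem.Int.bxor_natCast]
    omega
  rw [h2]
  set b := (a ^^^ (a >>> 5)) % 16777216 with hB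
  have h3 : (PySem.Int.bxor ((b : Nat) : Int) (((b : Nat) : Int) <<< (11:Nat))) % (16777216 : Int)
      = (((b ^^^ (b <<< 11)) % 16777216 : Nat) : Int) := by
    have hsl : (((b : Nat) : Int)) <<< (11:Nat) = ((b <<< 11 : Nat) : Int) := rfl
    rw [hsl, PySem.Int.bxor_natCast]
    omega
  rw [h3]
  rfl

lemma pvEvolve_emod (n : Int) : pvEvolve n = pvEvolve (n % 16777216) := by
  rw [pvEvolve_eq_evolveN (n % 16777216), pvEvolve_eq_evolveN n]
  have : pvLow (n % 16777216) = pvLow n := by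
    unfold pvLow; omega
  rw [this]

lemma pvEvolve_range (n : Int) : 0 ≤ pvEvolve n ∧ pvEvolve n < 16777216 := by
  rw [pvEvolve_eq_evolveN]
  have := evolveN_lt (pvLow n)
  omega

-- ---- the table step computes pvEvolve on [0, 2^24) ----

lemma pvStep_eq (n : Int) : pvStep n = pvEvolve n := rfl

lemma table_lookup (t : List Int) (f : Nat → Int) (ht : t = (List.range 256).map f)
    (j : Nat) (hj : j < 256) : PySem.List.pyGetD t ((j : Nat) : Int) 0 = f j := by
  rw [ht, PySem.List.pyGetD_natCast, PySem.List.getD_map_range _ _ _ _ hj]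

lemma pvTableStep_eq (s : Int) (h0 : 0 ≤ s) (h1 : s < 16777216) :
    pvTableStep s = pvEvolve s := by
  obtain ⟨m, rfl⟩ : ∃ m : Nat, s = ((m : Nat) : Int) := ⟨s.toNat, by omega⟩
  have hm : m < 16777216 := by omega
  unfold pvTableStep
  have h255 : (255 : Int) = ((255 : Nat) : Int) := by norm_num
  have hsr8 : ((m : Nat) : Int) >>> (8:Nat) = ((m >>> 8 : Nat) : Int) := rfl
  have hsr16 : ((m : Nat) : Int) >>> (16:Nat) = ((m >>> 16 : Nat) : Int) := rfl
  rw [h255, hsr8, hsr16, PySem.Int.band_natCast, PySem.Int.band_natCast]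
  have hj0 : m &&& 255 < 256 := by
    have : m &&& 255 = m % 256 := Nat.and_two_pow_sub_one_eq_mod m 8
    omega
  have hj1 : (m >>> 8) &&& 255 < 256 := by
    have : (m >>> 8) &&& 255 = (m >>> 8) % 256 := Nat.and_two_pow_sub_one_eq_mod _ 8
    omega
  have hj2 : m >>> 16 < 256 := by
    have : m >>> 16 = m / 65536 := Nat.shiftRight_eq_div_pow m 16
    omega
  rw [table_lookup pvT0 _ rfl _ hj0, table_lookup pvT1 _ rfl _ hj1,
      table_lookup pvT2 _ rfl _ hj2]
  simp only [Int.ofNat_eq_natCast]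
  rw [pvStep_eq, pvStep_eq, pvStep_eq, pvEvolve_eq_evolveN, pvEvolve_eq_evolveN,
      pvEvolve_eq_evolveN, pvEvolve_eq_evolveN]
  have hlow : ∀ j : Nat, j < 16777216 → pvLow ((j : Nat) : Int) = j := by
    intro j hj; unfold pvLow; omega
  rw [hlow _ (by omega), hlow _ (by omega), hlow _ (by
        have : ((m >>> 8) &&& 255) <<< 8 = ((m >>> 8) &&& 255) * 256 := Nat.shiftLeft_eq _ 8
        omega),
      hlow _ (by
        have : (m >>> 16) <<< 16 = (m >>> 16) * 65536 := Nat.shiftLeft_eq _ 16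
        omega)]
  rw [PySem.Int.bxor_natCast, PySem.Int.bxor_natCast]
  rw [← evolveN_xor, ← evolveN_xor]
  rw [← byte_decomp m hm]

-- ---- the diff pass ----

lemma pvDiffs_cons_cons (x y : Int) (t : List Int) :
    pvDiffs (x :: y :: t) = (y - x) :: pvDiffs (y :: t) := by
  simp [pvDiffs]

lemma pvDiffs_concat (full : List Int) (d : Int) (h : full ≠ []) :
    pvDiffs (full ++ [d]) = pvDiffs full ++ [d - full.getLastD 0] := by
  induction full with
  | nil => exact absurd rfl h
  | cons x t ih =>
    cases t with
    | nil => simp [pvDiffs]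
    | cons y t' =>
      have := ih (by simp)
      simp only [List.cons_append] at *
      rw [pvDiffs_cons_cons, pvDiffs_cons_cons, this]
      simp

-- A's fused fold versus the generate-only fold (with pvEvolve)
lemma loop_inv (l : List Int) (n : Int) (full : List Int) (h : full ≠ []) :
    l.foldl
      (fun (st : Int × Int × List Int × List Int) _ =>
        let m := pvEvolve st.1
        let d := PySem.Int.mod m 10
        (m, d, st.2.2.1 ++ [d], st.2.2.2 ++ [d - st.2.1]))
      (n, full.getLastD 0, full.drop 1, pvDiffs full)
    =
    (let st := l.foldl
        (fun (st : Int × List Int) _ =>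
          let m := pvEvolve st.1
          (m, st.2 ++ [PySem.Int.mod m 10]))
        (n, full)
     (st.1, st.2.getLastD 0, st.2.drop 1, pvDiffs st.2)) := by
  induction l generalizing n full with
  | nil => rfl
  | cons a l ih =>
    simp only [List.foldl_cons]
    have hd1 : full.drop 1 ++ [PySem.Int.mod (pvEvolve n) 10]
        = (full ++ [PySem.Int.mod (pvEvolve n) 10]).drop 1 := by
      cases full with
      | nil => exact absurd rfl h
      | cons x t => simp
    have H := ih (pvEvolve n) (full ++ [PySem.Int.mod (pvEvolve n) 10]) (by simp)
    rw [List.getLastD_concat, ← hd1, pvDiffs_concat full _ h] at H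
    exact H

-- B's table fold versus the generate-only fold (with pvEvolve)
lemma fold_states (l : List Int) (n : Int) (full : List Int) :
    l.foldl
      (fun (st : Int × List Int) _ =>
        let s := pvTableStep st.1
        (s, st.2 ++ [PySem.Int.mod s 10]))
      (n % 16777216, full)
    =
    (let r := l.foldl
        (fun (st : Int × List Int) _ =>
          let m := pvEvolve st.1
          (m, st.2 ++ [PySem.Int.mod m 10]))
        (n, full)
     (r.1 % 16777216, r.2)) := by
  induction l generalizing n full with
  | nil => rfl
  | cons a l ih =>
    simp only [List.foldl_cons]
    have hmb : 0 ≤ n % 16777216 ∧ n % 16777216 < 16777216 := by omega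
    have h1 : pvTableStep (n % 16777216) = pvEvolve n := by
      rw [pvTableStep_eq _ hmb.1 hmb.2, ← pvEvolve_emod]
    have hrange := pvEvolve_range n
    have h2 : pvEvolve n = (pvEvolve n) % 16777216 := by omega
    rw [h1]
    have H := ih (pvEvolve n) (full ++ [PySem.Int.mod (pvEvolve n) 10])
    rw [← h2] at H
    exact H

-- ===== VERDICT (by name: the statement is the Claim_ definition above) =====
theorem prices_and_diffs_spec : Claim_equal_prices_and_diffs := by
  intro n rounds _
  show prices_and_diffs n rounds = prices_and_diffs_alt n rounds
  unfold prices_and_diffs prices_and_diffs_alt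
  have hM : (0:Int) < 16777216 := by norm_num
  rw [PySem.Int.mod_eq_emod_of_pos hM]
  have h0 : ([PySem.Int.mod n 10] : List Int) ≠ [] := by simp
  rw [fold_states (PySem.List.pyRange 0 rounds 1) n [PySem.Int.mod n 10]]
  have key := loop_inv (PySem.List.pyRange 0 rounds 1) n [PySem.Int.mod n 10] h0
  rw [show ([PySem.Int.mod n 10] : List Int).getLastD 0 = PySem.Int.mod n 10 from rfl,
      show ([PySem.Int.mod n 10] : List Int).drop 1 = [] from rfl,
      show pvDiffs [PySem.Int.mod n 10] = [] from by simp [pvDiffs]] at key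
  simp only [key]
  simp [PySem.List.slice_from]
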